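-- pv_equiv track=rewrite | github.com/maxbaydi/ai-part-generator | bridge/music_theory.py | calculate_voice_leading_cost
-- ===== SOURCE A (Python) =====
-- from typing import Dict, List, Optional, Set, Tuple
--
-- def calculate_voice_leading_cost(chord1_pitches: List[int], chord2_pitches: List[int]) -> int:
--     if not chord1_pitches or not chord2_pitches:
--         return 0
--
--     total_movement = 0
--     for p1 in chord1_pitches:
--         min_distance = min(abs(p2 - p1) for p2 in chord2_pitches)
--         total_movement += min_distance
--
--     return total_movement
-- ===== SOURCE B (Python) =====
-- from typing import List
--
--
-- def calculate_voice_leading_cost(chord1_pitches: List[int], chord2_pitches: List[int]) -> int: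
--     if not chord1_pitches or not chord2_pitches:
--         return 0
--
--     s = sorted(chord2_pitches)
--     n = len(s)
--     total = 0
--     for p in chord1_pitches:
--         # binary search: lo = index of first element >= p
--         lo, hi = 0, n
--         while lo < hi:
--             mid = (lo + hi) // 2
--             if s[mid] < p:
--                 lo = mid + 1
--             else:
--                 hi = mid
--         if lo == n:
--             total += p - s[n - 1]
--         elif lo == 0:
--             total += s[0] - p
--         else:
--             total += min(s[lo] - p, p - s[lo - 1])
--     return total
-- ===== Notes on version B (the rewrite author's own statement) =====
-- stated objective: faster
-- what changed: B sorts chord2 once and finds each pitch's nearest neighbor by hand-written binary search (comparing the two candidates around the insertion point) instead of A's inner linear min-scan over chord2 for every pitch.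
import Mathlib
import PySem

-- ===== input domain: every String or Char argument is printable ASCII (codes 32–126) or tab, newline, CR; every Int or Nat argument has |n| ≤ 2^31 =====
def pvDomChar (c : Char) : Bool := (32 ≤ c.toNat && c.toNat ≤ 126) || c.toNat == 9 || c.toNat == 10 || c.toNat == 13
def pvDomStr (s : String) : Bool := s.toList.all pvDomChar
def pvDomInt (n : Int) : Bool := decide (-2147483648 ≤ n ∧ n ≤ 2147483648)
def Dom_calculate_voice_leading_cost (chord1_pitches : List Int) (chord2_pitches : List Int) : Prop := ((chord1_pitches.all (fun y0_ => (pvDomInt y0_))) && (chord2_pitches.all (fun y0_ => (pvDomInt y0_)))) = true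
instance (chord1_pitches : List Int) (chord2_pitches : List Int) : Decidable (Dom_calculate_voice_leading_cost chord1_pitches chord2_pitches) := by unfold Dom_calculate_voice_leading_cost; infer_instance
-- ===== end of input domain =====

-- B sorts chord2 once and binary-searches each pitch's nearest neighbor instead of A's inner linear min-scan; proved to return the same total.


-- ===== PORT A =====
-- A: guard on either list empty, then for each p1 add min(abs(p2 - p1) for p2 in chord2).
-- The `.getD 0` default is never used inside the guard (chord2 nonempty ⇒ min? = some).
def calculate_voice_leading_cost (chord1_pitches : List Int) (chord2_pitches : List Int) : Int :=
  if chord1_pitches = [] ∨ chord2_pitches = [] then 0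
  else
    chord1_pitches.foldl
      (fun total_movement p1 =>
        total_movement +
          (PySem.List.min? (chord2_pitches.map (fun p2 => |p2 - p1|)) (fun x => x)).getD 0)
      0

-- ===== PORT B =====
-- hand-written binary search from Source B: first index in s[lo:hi) whose value is ≥ p
def pvBS (s : List Int) (p : Int) (lo hi : Nat) : Nat :=
  if lo < hi then
    let mid := (lo + hi) / 2
    if s.getD mid 0 < p then pvBS s p (mid + 1) hi else pvBS s p lo mid
  else lo
termination_by hi - lo
decreasing_by all_goals omega

-- the per-pitch body of Source B's loop
def pvNearest (s : List Int) (p : Int) : Int :=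
  let n := s.length
  let lo := pvBS s p 0 n
  if lo = n then p - s.getD (n - 1) 0
  else if lo = 0 then s.getD 0 0 - p
  else min (s.getD lo 0 - p) (p - s.getD (lo - 1) 0)

def calculate_voice_leading_cost_alt (chord1_pitches : List Int) (chord2_pitches : List Int) : Int :=
  if chord1_pitches = [] ∨ chord2_pitches = [] then 0
  else
    let s := PySem.List.sorted chord2_pitches (fun x => x) false
    chord1_pitches.foldl (fun total p => total + pvNearest s p) 0

-- ===== PRECONDITION & SPEC =====
def Spec_calculate_voice_leading_cost (chord1_pitches : List Int) (chord2_pitches : List Int) (out : Int) : Prop := out = calculate_voice_leading_cost_alt chord1_pitches chord2_pitches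
instance (chord1_pitches : List Int) (chord2_pitches : List Int) (out : Int) : Decidable (Spec_calculate_voice_leading_cost chord1_pitches chord2_pitches out) := by unfold Spec_calculate_voice_leading_cost; infer_instance

-- ===== CLAIM (what is proved, stated in full; the proofs are below) =====
def Claim_equal_calculate_voice_leading_cost : Prop := ∀ (chord1_pitches : List Int) (chord2_pitches : List Int), Dom_calculate_voice_leading_cost chord1_pitches chord2_pitches → Spec_calculate_voice_leading_cost chord1_pitches chord2_pitches (calculate_voice_leading_cost chord1_pitches chord2_pitches)

-- ===== LEMMAS AND PROOFS =====


theorem getD_mem (s : List Int) (i : Nat) (hi : i < s.length) : s.getD i 0 ∈ s := by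
  rw [List.getD_eq_getElem s 0 hi]
  exact List.getElem_mem hi

theorem getD_mono (s : List Int) (hs : s.Pairwise (· ≤ ·)) (i j : Nat)
    (hij : i ≤ j) (hj : j < s.length) : s.getD i 0 ≤ s.getD j 0 := by
  have hi : i < s.length := lt_of_le_of_lt hij hj
  rw [List.getD_eq_getElem s 0 hi, List.getD_eq_getElem s 0 hj]
  rcases Nat.eq_or_lt_of_le hij with h | h
  · subst h; rfl
  · exact List.pairwise_iff_getElem.mp hs i j hi hj h

theorem pvBS_spec (s : List Int) (p : Int) (hs : s.Pairwise (· ≤ ·)) (lo hi : Nat)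
    (hlohi : lo ≤ hi) (hhi : hi ≤ s.length)
    (hlow : ∀ i, i < lo → s.getD i 0 < p)
    (hhigh : ∀ i, hi ≤ i → i < s.length → p ≤ s.getD i 0) :
    pvBS s p lo hi ≤ s.length ∧
      (∀ i, i < pvBS s p lo hi → s.getD i 0 < p) ∧
      (∀ i, pvBS s p lo hi ≤ i → i < s.length → p ≤ s.getD i 0) := by
  fun_induction pvBS s p lo hi with
  | case1 lo hi hlt mid hmidlt ih =>
    apply ih (by omega) hhi
    · intro i hi2
      exact lt_of_le_of_lt (getD_mono s hs i mid (by omega) (by omega)) hmidlt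
    · exact hhigh
  | case2 lo hi hlt mid hmidge ih =>
    apply ih (by omega) (by omega) hlow
    intro i hge hilen
    exact le_trans (le_of_not_gt hmidge) (getD_mono s hs mid i hge hilen)
  | case3 lo hi h =>
    exact ⟨by omega, hlow, fun i hge hl => hhigh i (by omega) hl⟩


theorem mem_getD (s : List Int) (q : Int) (hq : q ∈ s) :
    ∃ i, i < s.length ∧ s.getD i 0 = q := by
  obtain ⟨i, hi, h⟩ := List.mem_iff_getElem.mp hq
  exact ⟨i, hi, by rw [List.getD_eq_getElem s 0 hi, h]⟩

theorem pvNearest_spec (s : List Int) (p : Int) (hs : s.Pairwise (· ≤ ·)) (hne : s ≠ []) :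
    (∃ q ∈ s, pvNearest s p = |q - p|) ∧ (∀ q ∈ s, pvNearest s p ≤ |q - p|) := by
  have hn : 0 < s.length := List.length_pos_iff.mpr hne
  obtain ⟨hk1, hk2, hk3⟩ := pvBS_spec s p hs 0 s.length (by omega) le_rfl
    (fun i h => absurd h (Nat.not_lt_zero i)) (fun i hge hl => absurd hl (by omega))
  unfold pvNearest
  set k := pvBS s p 0 s.length with hk
  by_cases hkn : k = s.length
  · rw [if_pos hkn]
    have hlast : s.getD (s.length - 1) 0 < p := hk2 _ (by omega)
    constructor
    · refine ⟨s.getD (s.length - 1) 0, getD_mem s _ (by omega), ?_⟩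
      rw [abs_of_neg (by omega)]; ring
    · intro q hq
      obtain ⟨i, hi, rfl⟩ := mem_getD s q hq
      have h1 : s.getD i 0 < p := hk2 i (by omega)
      have h2 : s.getD i 0 ≤ s.getD (s.length - 1) 0 := getD_mono s hs i _ (by omega) (by omega)
      rw [abs_of_neg (by omega)]; omega
  · rw [if_neg hkn]
    have hklt : k < s.length := by omega
    have hpk : p ≤ s.getD k 0 := hk3 k le_rfl hklt
    by_cases hk0 : k = 0
    · rw [if_pos hk0]
      rw [hk0] at hpk
      rw [hk0] at hk3
      constructor
      · refine ⟨s.getD 0 0, getD_mem s _ hn, ?_⟩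
        rw [abs_of_nonneg (by omega)]
      · intro q hq
        obtain ⟨i, hi, rfl⟩ := mem_getD s q hq
        have h2 : s.getD 0 0 ≤ s.getD i 0 := getD_mono s hs 0 i (by omega) hi
        rw [abs_of_nonneg (by omega)]; omega
    · rw [if_neg hk0]
      have hprev : s.getD (k - 1) 0 < p := hk2 _ (by omega)
      constructor
      · rcases min_cases (s.getD k 0 - p) (p - s.getD (k - 1) 0) with ⟨heq, _⟩ | ⟨heq, _⟩
        · refine ⟨s.getD k 0, getD_mem s _ hklt, ?_⟩
          rw [heq, abs_of_nonneg (by omega)]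
        · refine ⟨s.getD (k - 1) 0, getD_mem s _ (by omega), ?_⟩
          rw [heq, abs_of_neg (by omega)]; ring
      · intro q hq
        obtain ⟨i, hi, rfl⟩ := mem_getD s q hq
        rcases Nat.lt_or_ge i k with h | h
        · have h2 : s.getD i 0 ≤ s.getD (k - 1) 0 := getD_mono s hs i _ (by omega) (by omega)
          have h1 : s.getD i 0 < p := hk2 i h
          rw [abs_of_neg (by omega)]
          exact le_trans (min_le_right (s.getD k 0 - p) (p - s.getD (k - 1) 0)) (by omega)
        · have h2 : s.getD k 0 ≤ s.getD i 0 := getD_mono s hs k i h hi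
          rw [abs_of_nonneg (by omega)]
          exact le_trans (min_le_left (s.getD k 0 - p) (p - s.getD (k - 1) 0)) (by omega)

theorem nearest_eq_min (c2 : List Int) (p : Int) (hne : c2 ≠ []) :
    (PySem.List.min? (c2.map (fun p2 => |p2 - p|)) (fun x => x)).getD 0 =
      pvNearest (PySem.List.sorted c2 (fun x => x) false) p := by
  set s := PySem.List.sorted c2 (fun x => x) false with hsdef
  have hs : s.Pairwise (· ≤ ·) := PySem.List.sorted_pairwise c2 (fun x => x)
  have hmem : ∀ x, x ∈ s ↔ x ∈ c2 := fun x => PySem.List.mem_sorted c2 (fun x => x) false x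
  have hsne : s ≠ [] := by
    intro h
    exact hne ((PySem.List.sorted_eq_nil_iff c2 (fun x => x) false).mp h)
  obtain ⟨⟨q0, hq0s, hq0⟩, hlb⟩ := pvNearest_spec s p hs hsne
  obtain ⟨m, hm⟩ : ∃ m, PySem.List.min? (c2.map (fun p2 => |p2 - p|)) (fun x => x) = some m := by
    cases h : PySem.List.min? (c2.map (fun p2 => |p2 - p|)) (fun x => x) with
    | none =>
      have := (PySem.List.min?_eq_none_iff _ _).mp h
      simp at this
      exact absurd this hne
    | some m => exact ⟨m, rfl⟩
  have hmmem : m ∈ c2.map (fun p2 => |p2 - p|) := PySem.List.min?_mem hm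
  have hmin : ∀ y ∈ c2.map (fun p2 => |p2 - p|), m ≤ y := by
    intro y hy
    exact PySem.List.min?_isMin hm y hy
  rw [hm]
  simp only [Option.getD_some]
  obtain ⟨q1, hq1, rfl⟩ := List.mem_map.mp hmmem
  apply le_antisymm
  · rw [hq0]
    exact hmin _ (List.mem_map.mpr ⟨q0, (hmem q0).mp hq0s, rfl⟩)
  · exact hlb q1 ((hmem q1).mpr hq1)

-- ===== VERDICT (by name: the statement is the Claim_ definition above) =====
theorem calculate_voice_leading_cost_spec : Claim_equal_calculate_voice_leading_cost := by
  intro c1 c2 _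
  unfold Spec_calculate_voice_leading_cost calculate_voice_leading_cost calculate_voice_leading_cost_alt
  split
  · rfl
  · rename_i h
    have h2 : c2 ≠ [] := fun hc => h (Or.inr hc)
    have hf : (fun (total_movement : Int) (p1 : Int) =>
        total_movement + (PySem.List.min? (c2.map (fun p2 => |p2 - p1|)) (fun x => x)).getD 0)
        = (fun (total : Int) (p : Int) =>
        total + pvNearest (PySem.List.sorted c2 (fun x => x) false) p) := by
      funext acc p
      rw [nearest_eq_min c2 p h2]
    rw [hf]
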